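-- pv_equiv track=rewrite | github.com/chboishabba/FRACDASH | scripts/render_trace_waveform.py | _apply
-- ===== SOURCE A (Python) =====
-- from typing import Any
--
-- def _register_names(count: int) -> list[str]:
--     return [f"R{idx + 1}" for idx in range(count)]
--
-- def _apply(state: tuple[int, ...], transition: dict[str, Any], register_count: int) -> tuple[int, ...]:
--     names = _register_names(register_count)
--     next_state = list(state)
--     for register, target in transition.get("action", {}).items():
--         if register not in names:
--             continue
--         idx = names.index(register)
--         next_state[idx] = {"negative": -1, "zero": 0, "positive": 1}[target]
--     return tuple(next_state)
-- ===== SOURCE B (Python) =====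
-- def _apply(state, transition, register_count):
--     action = transition.get("action", {})
--     code = {"negative": -1, "zero": 0, "positive": 1}
--     return tuple(
--         code[action[f"R{idx + 1}"]]
--         if idx < register_count and f"R{idx + 1}" in action
--         else value
--         for idx, value in enumerate(state)
--     )
-- ===== Notes on version B (the rewrite author's own statement) =====
-- stated objective: idiomatic
-- what changed: B rebuilds the state tuple in one comprehension over enumerate(state), querying the action dict per register slot, instead of scanning the action entries and locating each register's index with names.index; Pre_ additionally requires the assoc-list encodings of the dicts to have distinct keys (a real Python dict always does).
import Mathlib
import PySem

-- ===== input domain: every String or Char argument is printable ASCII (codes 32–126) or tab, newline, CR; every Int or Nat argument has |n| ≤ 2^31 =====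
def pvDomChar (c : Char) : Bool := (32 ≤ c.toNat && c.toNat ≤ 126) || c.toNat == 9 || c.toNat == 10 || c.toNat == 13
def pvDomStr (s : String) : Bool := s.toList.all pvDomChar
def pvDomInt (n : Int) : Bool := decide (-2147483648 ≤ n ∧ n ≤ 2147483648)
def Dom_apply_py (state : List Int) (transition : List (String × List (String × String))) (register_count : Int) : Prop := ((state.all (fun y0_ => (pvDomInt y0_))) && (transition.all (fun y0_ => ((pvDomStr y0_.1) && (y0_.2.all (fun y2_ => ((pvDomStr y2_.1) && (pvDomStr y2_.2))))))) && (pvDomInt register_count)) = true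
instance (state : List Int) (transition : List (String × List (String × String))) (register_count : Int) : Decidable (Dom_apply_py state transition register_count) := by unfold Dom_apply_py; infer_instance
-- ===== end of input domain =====

-- B rebuilds the next state per register slot (enumerate + dict lookup) instead of scanning the
-- action entries and locating each register's index in the name list; objective: idiomatic.

-- shared helpers (both Pythons build the same name strings, the same code table,
-- and read transition.get("action", {}) the same way)
def pvRegisterNames (count : Int) : List String :=
  (PySem.List.pyRange 0 count 1).map (fun idx => "R" ++ PySem.Int.toStr (idx + 1))

def pvActionCode (t : String) : Option Int :=
  PySem.Dict.get? (PySem.Dict.ofList [("negative", (-1 : Int)), ("zero", 0), ("positive", 1)]) t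

def pvActionOf (transition : List (String × List (String × String))) : List (String × String) :=
  PySem.Dict.getD (PySem.Dict.mk transition) "action" []

-- ===== PORT A =====
-- scans the action entries; for each one locates the register's slot via names.index
def apply_py (state : List Int) (transition : List (String × List (String × String))) (register_count : Int) : List Int :=
  let names := pvRegisterNames register_count
  (pvActionOf transition).foldl
    (fun next_state rt =>
      if rt.1 ∈ names then
        match PySem.List.index? names rt.1, pvActionCode rt.2 with
        | some idx, some v => PySem.List.pySetD next_state (idx : Int) v
        | _, _ => next_state   -- Python raises KeyError/IndexError here; excluded by Pre_
      else next_state)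
    state

-- ===== PORT B =====
-- rebuilds the tuple slot by slot, querying the action dict per slot
def apply_py_alt (state : List Int) (transition : List (String × List (String × String))) (register_count : Int) : List Int :=
  let action := PySem.Dict.mk (pvActionOf transition)
  (PySem.List.enumerate state).map
    (fun iv =>
      if iv.1 < register_count ∧ action.contains ("R" ++ PySem.Int.toStr (iv.1 + 1)) = true then
        match action.get? ("R" ++ PySem.Int.toStr (iv.1 + 1)) with
        | some t => (pvActionCode t).getD iv.2   -- Python raises KeyError here; excluded by Pre_
        | none => iv.2
      else iv.2)

-- ===== PRECONDITION & SPEC =====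
-- pvParseReg r = some n iff r is exactly "R" followed by the canonical decimal of n
def pvParseReg (r : String) : Option Int :=
  match r.toList with
  | 'R' :: ds =>
      let n : Int := ds.foldl (fun acc c => acc * 10 + ((c.toNat : Int) - 48)) 0
      if PySem.Int.toChars n = ds then some n else none
  | _ => none

def pvEntryOk (state_len : Int) (rc : Int) (p : String × String) : Bool :=
  match pvParseReg p.1 with
  | some n =>
      if 1 ≤ n ∧ n ≤ rc then
        decide (p.2 = "negative" ∨ p.2 = "zero" ∨ p.2 = "positive") && decide (n ≤ state_len)
      else true
  | none => true

-- Pre_ excludes (a) assoc lists with duplicate dict keys (in transition or in its action table):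
-- a real Python dict cannot have them, so first-vs-last match there is an accident of the list
-- encoding; and (b) action entries naming a valid register ("R1".."R<register_count>") with a
-- target outside negative/zero/positive (Python KeyError) or a register slot beyond len(state)
-- (Python IndexError).
def Pre_apply_py (state : List Int) (transition : List (String × List (String × String))) (register_count : Int) : Prop :=
  (transition.map Prod.fst).Nodup ∧
  ((pvActionOf transition).map Prod.fst).Nodup ∧
  ∀ p ∈ pvActionOf transition, pvEntryOk (state.length : Int) register_count p = true
instance (state : List Int) (transition : List (String × List (String × String))) (register_count : Int) : Decidable (Pre_apply_py state transition register_count) := by unfold Pre_apply_py; infer_instance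

def pvWitness_apply_py : List Int × (List (String × List (String × String))) × Int :=
  ([0, 5], [("action", [("R1", "positive"), ("R9", "zero")])], 2)

def Spec_apply_py (state : List Int) (transition : List (String × List (String × String))) (register_count : Int) (out : List Int) : Prop := out = apply_py_alt state transition register_count
instance (state : List Int) (transition : List (String × List (String × String))) (register_count : Int) (out : List Int) : Decidable (Spec_apply_py state transition register_count out) := by unfold Spec_apply_py; infer_instance

-- ===== CLAIM (what is proved, stated in full; the proofs are below) =====
def Claim_equal_apply_py : Prop := ∀ (state : List Int) (transition : List (String × List (String × String))) (register_count : Int), Dom_apply_py state transition register_count → Pre_apply_py state transition register_count → Spec_apply_py state transition register_count (apply_py state transition register_count)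

-- ===== LEMMAS AND PROOFS =====

theorem pvDigitChar_inj {m n : ℕ} (hm : m < 10) (hn : n < 10)
    (h : Nat.digitChar m = Nat.digitChar n) : m = n := by
  interval_cases m <;> interval_cases n <;> simp_all [Nat.digitChar]

theorem pvToDigits10_inj (m : ℕ) : ∀ n : ℕ, Nat.toDigits 10 m = Nat.toDigits 10 n → m = n := by
  induction m using Nat.strong_induction_on with
  | _ m ih =>
    intro n h
    rcases lt_or_ge m 10 with hm | hm <;> rcases lt_or_ge n 10 with hn | hn
    · exact pvDigitChar_inj hm hn (by
        rw [Nat.toDigits_of_lt_base hm, Nat.toDigits_of_lt_base hn] at h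
        exact List.head_eq_of_cons_eq h)
    · exfalso
      rw [Nat.toDigits_of_lt_base hm, Nat.toDigits_of_base_le (by norm_num) hn] at h
      have hlen := congrArg List.length h
      simp only [List.length_cons, List.length_append, List.length_nil] at hlen
      have := Nat.length_toDigits_pos (b := 10) (n := n / 10)
      omega
    · exfalso
      rw [Nat.toDigits_of_lt_base hn, Nat.toDigits_of_base_le (by norm_num) hm] at h
      have hlen := congrArg List.length h
      simp only [List.length_cons, List.length_append, List.length_nil] at hlen
      have := Nat.length_toDigits_pos (b := 10) (n := m / 10)
      omega
    · rw [Nat.toDigits_of_base_le (by norm_num) hm, Nat.toDigits_of_base_le (by norm_num) hn] at h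
      obtain ⟨h1, h2⟩ := List.append_inj' h rfl
      have hdiv := ih (m / 10) (Nat.div_lt_self (by omega) (by norm_num)) (n / 10) h1
      have hmod := pvDigitChar_inj (Nat.mod_lt _ (by norm_num)) (Nat.mod_lt _ (by norm_num))
        (List.head_eq_of_cons_eq h2)
      omega

theorem pvToChars_inj {a b : Int} (ha : 0 ≤ a) (hb : 0 ≤ b)
    (h : PySem.Int.toChars a = PySem.Int.toChars b) : a = b := by
  unfold PySem.Int.toChars at h
  rw [if_neg (by omega), if_neg (by omega)] at h
  have := pvToDigits10_inj a.toNat b.toNat h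
  omega

theorem pvName_inj {x y : Int} (hx : 0 ≤ x) (hy : 0 ≤ y)
    (h : "R" ++ PySem.Int.toStr (x + 1) = "R" ++ PySem.Int.toStr (y + 1)) : x = y := by
  have h' := congrArg String.toList h
  simp only [String.toList_append] at h'
  rw [PySem.Int.toList_toStr, PySem.Int.toList_toStr] at h'
  have h'' : PySem.Int.toChars (x + 1) = PySem.Int.toChars (y + 1) := by
    have := List.append_cancel_left h'
    exact this
  have := pvToChars_inj (a := x + 1) (b := y + 1) (by omega) (by omega) h''
  omega

theorem pvNames_length (rc : Int) : (pvRegisterNames rc).length = rc.toNat := by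
  simp [pvRegisterNames, PySem.List.length_pyRange_one]

theorem pvNames_getElem (rc : Int) (k : ℕ) (h : k < (pvRegisterNames rc).length) :
    (pvRegisterNames rc)[k] = "R" ++ PySem.Int.toStr ((k : Int) + 1) := by
  simp only [pvRegisterNames, List.getElem_map]
  rw [PySem.List.getElem_pyRange_one]
  simp

theorem pvNames_nodup (rc : Int) : (pvRegisterNames rc).Nodup := by
  apply List.Nodup.map_on _ (PySem.List.nodup_pyRange_one 0 rc)
  intro x hx y hy hxy
  rw [PySem.List.mem_pyRange_one] at hx hy
  exact pvName_inj hx.1 hy.1 hxy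

theorem pvMapEnumExt {β : Type} (s s' : List Int) (g g' : Int × Int → β)
    (hl : s'.length = s.length)
    (h : ∀ (k : ℕ) (hk : k < s.length), g ((k : Int), s'[k]'(by omega)) = g' ((k : Int), s[k])) :
    (PySem.List.enumerate s').map g = (PySem.List.enumerate s).map g' := by
  apply List.ext_getElem
  · simp [PySem.List.length_enumerate, hl]
  · intro k h1 h2
    have hk : k < s.length := by simpa [PySem.List.length_enumerate] using h2
    simp only [List.getElem_map, PySem.List.getElem_enumerate]
    simpa using h k hk

theorem pvFoldEqMap (rc : Int) :
    ∀ (action : List (String × String)) (s : List Int),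
    (action.map Prod.fst).Nodup →
    (∀ p ∈ action, p.1 ∈ pvRegisterNames rc →
      (pvActionCode p.2).isSome ∧
      ∀ i, PySem.List.index? (pvRegisterNames rc) p.1 = some i → i < s.length) →
    action.foldl
      (fun next_state rt =>
        if rt.1 ∈ pvRegisterNames rc then
          match PySem.List.index? (pvRegisterNames rc) rt.1, pvActionCode rt.2 with
          | some idx, some v => PySem.List.pySetD next_state (idx : Int) v
          | _, _ => next_state
        else next_state) s
    = (PySem.List.enumerate s).map
      (fun iv =>
        if iv.1 < rc ∧ (PySem.Dict.mk action).contains ("R" ++ PySem.Int.toStr (iv.1 + 1)) = true then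
          match (PySem.Dict.mk action).get? ("R" ++ PySem.Int.toStr (iv.1 + 1)) with
          | some t => (pvActionCode t).getD iv.2
          | none => iv.2
        else iv.2) := by
  intro action
  induction action with
  | nil =>
    intro s _ _
    simp [PySem.Dict.contains_mk, PySem.List.map_snd_enumerate]
  | cons p rest ih =>
    intro s hnd hval
    obtain ⟨r, t⟩ := p
    have hnd' := hnd
    simp only [List.map_cons, List.nodup_cons] at hnd'
    have hr_not : r ∉ rest.map Prod.fst := hnd'.1
    have hndr : (rest.map Prod.fst).Nodup := hnd'.2
    simp only [List.foldl_cons]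
    by_cases hr : r ∈ pvRegisterNames rc
    · obtain ⟨hcode, hidx⟩ := hval (r, t) List.mem_cons_self hr
      obtain ⟨v, hv⟩ := Option.isSome_iff_exists.mp hcode
      obtain ⟨i, hi⟩ := Option.isSome_iff_exists.mp
        ((PySem.List.index?_isSome_iff (pvRegisterNames rc) r).mpr hr)
      obtain ⟨hilt, hnames_i, -⟩ := PySem.List.getElem_of_index?_eq_some hi
      have his : i < s.length := hidx i hi
      have hirc : (i : Int) < rc := by
        have := pvNames_length rc
        omega
      have hname : "R" ++ PySem.Int.toStr ((i : Int) + 1) = r := by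
        rw [← pvNames_getElem rc i hilt, hnames_i]
      have hacc :
          (if r ∈ pvRegisterNames rc then
            match PySem.List.index? (pvRegisterNames rc) r, pvActionCode t with
            | some idx, some v => PySem.List.pySetD s (idx : Int) v
            | _, _ => s
          else s) = s.set i v := by
        rw [if_pos hr, hi, hv]
        show PySem.List.pySetD s (i : Int) v = s.set i v
        rw [PySem.List.pySetD_of_nonneg s v (by omega)]
        simp
      rw [hacc]
      rw [ih (s.set i v) hndr ?hval']
      case hval' =>
        intro p hp hm
        obtain ⟨h1, h2⟩ := hval p (List.mem_cons_of_mem _ hp) hm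
        exact ⟨h1, fun j hj => by rw [List.length_set]; exact h2 j hj⟩
      apply pvMapEnumExt _ _ _ _ List.length_set
      intro k hk
      by_cases hki : k = i
      · subst hki
        rw [List.getElem_set_self (by simpa using his)]
        rw [hname]
        have hrest : rest.any (fun q => q.1 == r) = false := by
          simp only [List.any_eq_false]
          intro q hq
          simp only [beq_iff_eq]
          intro he
          exact hr_not (he ▸ List.mem_map_of_mem hq)
        simp [PySem.Dict.contains_mk, PySem.Dict.get?_mk_cons, hrest, hirc, hv]
      · rw [List.getElem_set_ne (fun he => hki he.symm) (by simpa using hk)]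
        by_cases hkrc : (k : Int) < rc
        · have hklen : k < (pvRegisterNames rc).length := by
            rw [pvNames_length]; omega
          have hne : (r == "R" ++ PySem.Int.toStr ((k : Int) + 1)) = false := by
            simp only [beq_eq_false_iff_ne]
            intro he
            apply hki
            have hkk : (pvRegisterNames rc)[k] = (pvRegisterNames rc)[i] := by
              rw [pvNames_getElem rc k hklen, ← he, hnames_i]
            exact ((pvNames_nodup rc).getElem_inj_iff).mp hkk
          simp only [PySem.Dict.contains_mk, PySem.Dict.get?_mk_cons, List.any_cons]
          rw [hne, Bool.false_or]
          simp
        · simp [hkrc]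
    · have hacc :
          (if r ∈ pvRegisterNames rc then
            match PySem.List.index? (pvRegisterNames rc) r, pvActionCode t with
            | some idx, some v => PySem.List.pySetD s (idx : Int) v
            | _, _ => s
          else s) = s := by
        rw [if_neg hr]
      rw [hacc]
      rw [ih s hndr (fun p hp hm => hval p (List.mem_cons_of_mem _ hp) hm)]
      apply pvMapEnumExt _ _ _ _ rfl
      intro k hk
      by_cases hkrc : (k : Int) < rc
      · have hklen : k < (pvRegisterNames rc).length := by
          rw [pvNames_length]; omega
        have hne : (r == "R" ++ PySem.Int.toStr ((k : Int) + 1)) = false := by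
          simp only [beq_eq_false_iff_ne]
          intro he
          apply hr
          rw [he, ← pvNames_getElem rc k hklen]
          exact List.getElem_mem hklen
        simp only [PySem.Dict.contains_mk, PySem.Dict.get?_mk_cons, List.any_cons]
        rw [hne, Bool.false_or]
        simp
      · simp [hkrc]

theorem pvDigitVal {m : ℕ} (hm : m < 10) : ((Nat.digitChar m).toNat : Int) - 48 = m := by
  interval_cases m <;> decide

theorem pvFoldDigits (m : ℕ) :
    ∀ a : Int, (Nat.toDigits 10 m).foldl (fun acc c => acc * 10 + ((c.toNat : Int) - 48)) a
      = a * 10 ^ (Nat.toDigits 10 m).length + m := by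
  induction m using Nat.strong_induction_on with
  | _ m ih =>
    intro a
    rcases lt_or_ge m 10 with hm | hm
    · rw [Nat.toDigits_of_lt_base hm]
      simp [pvDigitVal hm]
    · rw [Nat.toDigits_of_base_le (by norm_num) hm]
      rw [List.foldl_append]
      rw [ih (m / 10) (Nat.div_lt_self (by omega) (by norm_num)) a]
      simp only [List.foldl_cons, List.foldl_nil, List.length_append, List.length_cons,
        List.length_nil]
      rw [pvDigitVal (Nat.mod_lt _ (by norm_num))]
      have h10 : m = 10 * (m / 10) + m % 10 := (Nat.div_add_mod m 10).symm
      have hpow : (10 : Int) ^ ((Nat.toDigits 10 (m / 10)).length + (0 + 1))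
          = 10 ^ (Nat.toDigits 10 (m / 10)).length * 10 := by ring
      rw [hpow]
      push_cast
      nlinarith [h10]

theorem pvFoldToChars {n : Int} (hn : 0 ≤ n) :
    (PySem.Int.toChars n).foldl (fun acc c => acc * 10 + ((c.toNat : Int) - 48)) 0 = n := by
  unfold PySem.Int.toChars
  rw [if_neg (by omega)]
  rw [pvFoldDigits n.toNat 0]
  omega

theorem pvStrRList (m : Int) : ("R" ++ PySem.Int.toStr m).toList = 'R' :: PySem.Int.toChars m := by
  rw [String.toList_append, PySem.Int.toList_toStr]
  rfl

theorem pvParseReg_name {i : Int} (hi : 0 ≤ i) :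
    pvParseReg ("R" ++ PySem.Int.toStr (i + 1)) = some (i + 1) := by
  unfold pvParseReg
  rw [pvStrRList]
  simp only []
  rw [pvFoldToChars (by omega)]
  rw [if_pos rfl]

-- ===== VERDICT (by name: the statement is the Claim_ definition above) =====
theorem apply_py_spec : Claim_equal_apply_py := by
  intro state transition rc _ hpre
  obtain ⟨-, hnd, hok⟩ := hpre
  unfold Spec_apply_py apply_py apply_py_alt
  refine (pvFoldEqMap rc (pvActionOf transition) state hnd ?_)
  intro p hp hmem
  have hmem' := hmem
  simp only [pvRegisterNames, List.mem_map, PySem.List.mem_pyRange_one] at hmem'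
  obtain ⟨x, ⟨hx0, hxrc⟩, hpr⟩ := hmem'
  have hparse : pvParseReg p.1 = some (x + 1) := by
    rw [← hpr]; exact pvParseReg_name hx0
  have hthis := hok p hp
  unfold pvEntryOk at hthis
  rw [hparse] at hthis
  simp only [] at hthis
  rw [if_pos ⟨by omega, by omega⟩] at hthis
  simp only [Bool.and_eq_true, decide_eq_true_eq] at hthis
  obtain ⟨ht, hlen⟩ := hthis
  constructor
  · rcases ht with h | h | h <;> rw [h] <;> decide
  · intro i hi
    obtain ⟨hilt, hnames_i, -⟩ := PySem.List.getElem_of_index?_eq_some hi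
    rw [pvNames_getElem rc i hilt] at hnames_i
    have : (i : Int) = x := pvName_inj (by omega) hx0 (by rw [hnames_i, hpr])
    omega
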